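-- pv_equiv track=rewrite | github.com/udihoitash/Boilerplate_new | boilerplate/boilerplate_counter.py | get_boiler_plate_word_count
-- ===== SOURCE A (Python) =====
-- def get_boiler_plate_word_count(boiler_phrases, row):
--     sentences = row.split('.')
--     boiler_count = 0
--     for sentence in sentences:
--         for phrase in boiler_phrases:
--             if phrase in sentence:
--                 boiler_count += len(sentence.split())
--                 break
--     return boiler_count
-- ===== SOURCE B (Python) =====
-- def get_boiler_plate_word_count(boiler_phrases, row):
--     # Transposed traversal: one boolean mask over sentences, OR-ed in per phrase,
--     # then a single summing pass (no per-sentence break logic).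
--     sentences = row.split('.')
--     matched = [False] * len(sentences)
--     for phrase in boiler_phrases:
--         matched = [m or (phrase in s) for m, s in zip(matched, sentences)]
--     total = 0
--     for m, s in zip(matched, sentences):
--         if m:
--             total += len(s.split())
--     return total
-- ===== Notes on version B (the rewrite author's own statement) =====
-- stated objective: alternative
-- what changed: A scans phrases per sentence with an early break; B transposes the traversal: it builds a boolean matched-mask over all sentences by OR-ing in one full pass per phrase, then sums word counts in a single final pass.
import Mathlib
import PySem

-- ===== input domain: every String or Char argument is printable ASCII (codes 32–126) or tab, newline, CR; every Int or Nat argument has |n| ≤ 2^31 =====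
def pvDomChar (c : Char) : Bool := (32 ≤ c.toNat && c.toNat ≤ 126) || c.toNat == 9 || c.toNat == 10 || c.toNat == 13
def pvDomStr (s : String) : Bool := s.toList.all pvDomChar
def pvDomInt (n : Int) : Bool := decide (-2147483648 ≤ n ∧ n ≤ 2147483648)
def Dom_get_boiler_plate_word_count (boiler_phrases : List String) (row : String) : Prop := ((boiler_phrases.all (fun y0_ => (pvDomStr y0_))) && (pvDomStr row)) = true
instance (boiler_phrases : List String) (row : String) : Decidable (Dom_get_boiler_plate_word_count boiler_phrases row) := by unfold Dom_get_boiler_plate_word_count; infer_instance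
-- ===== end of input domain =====

-- B transposes A's traversal: a boolean matched-mask over sentences, one OR pass per phrase, then one summing pass (alternative decomposition, same cost).
-- ===== PORT A =====
-- A's inner 'for phrase … if phrase in sentence: …; break' : true iff some phrase matched
def pvAnyPhrase (boiler_phrases : List String) (sentence : String) : Bool :=
  match boiler_phrases with
  | [] => false
  | p :: rest => if PySem.Str.isIn p sentence then true else pvAnyPhrase rest sentence

def get_boiler_plate_word_count (boiler_phrases : List String) (row : String) : Int :=
  ((PySem.Str.split? row ".").getD []).foldl
    (fun boiler_count sentence =>
      if pvAnyPhrase boiler_phrases sentence then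
        boiler_count + ((PySem.Str.split₀ sentence).length : Int)
      else boiler_count) 0

-- ===== PORT B =====
def get_boiler_plate_word_count_alt (boiler_phrases : List String) (row : String) : Int :=
  let sentences := (PySem.Str.split? row ".").getD []
  let matched := boiler_phrases.foldl
    (fun matched phrase =>
      (matched.zip sentences).map (fun ms => ms.1 || PySem.Str.isIn phrase ms.2))
    (List.replicate sentences.length false)
  (matched.zip sentences).foldl
    (fun total ms => if ms.1 then total + ((PySem.Str.split₀ ms.2).length : Int) else total) 0

-- ===== PRECONDITION & SPEC =====
def Spec_get_boiler_plate_word_count (boiler_phrases : List String) (row : String) (out : Int) : Prop := out = get_boiler_plate_word_count_alt boiler_phrases row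
instance (boiler_phrases : List String) (row : String) (out : Int) : Decidable (Spec_get_boiler_plate_word_count boiler_phrases row out) := by unfold Spec_get_boiler_plate_word_count; infer_instance

-- ===== CLAIM (what is proved, stated in full; the proofs are below) =====
def Claim_equal_get_boiler_plate_word_count : Prop := ∀ (boiler_phrases : List String) (row : String), Dom_get_boiler_plate_word_count boiler_phrases row → Spec_get_boiler_plate_word_count boiler_phrases row (get_boiler_plate_word_count boiler_phrases row)

-- ===== LEMMAS AND PROOFS =====

-- one OR pass of B, applied to a mask that is a map over the sentences, is again such a map
lemma pvStep_eq (sentences : List String) (f : String → Bool) (p : String) :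
    ((sentences.map f).zip sentences).map (fun ms => ms.1 || PySem.Str.isIn p ms.2)
      = sentences.map (fun s => f s || PySem.Str.isIn p s) := by
  induction sentences with
  | nil => rfl
  | cons s t ih =>
    simp only [List.map_cons, List.zip_cons_cons]
    rw [ih]

-- B's mask after all phrases marks exactly the sentences A's inner break-loop accepts
lemma pvFold_eq (bp sentences : List String) (f : String → Bool) :
    bp.foldl
      (fun matched phrase =>
        (matched.zip sentences).map (fun ms => ms.1 || PySem.Str.isIn phrase ms.2))
      (sentences.map f)
    = sentences.map (fun s => f s || pvAnyPhrase bp s) := by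
  induction bp generalizing f with
  | nil => simp [pvAnyPhrase]
  | cons p rest ih =>
    simp only [List.foldl_cons, pvStep_eq, ih]
    apply List.map_congr_left
    intro s _
    simp [pvAnyPhrase, Bool.or_assoc]

lemma pvMask_eq (bp sentences : List String) :
    bp.foldl
      (fun matched phrase =>
        (matched.zip sentences).map (fun ms => ms.1 || PySem.Str.isIn phrase ms.2))
      (List.replicate sentences.length false)
    = sentences.map (pvAnyPhrase bp) := by
  have h : List.replicate sentences.length false
      = sentences.map (fun _ => false) := by simp
  rw [h, pvFold_eq]
  simp

-- summing over the (mask, sentence) zip is A's single conditional-sum loop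
lemma pvSum_eq (sentences : List String) (g : String → Bool) (acc : Int) :
    ((sentences.map g).zip sentences).foldl
      (fun total ms => if ms.1 then total + ((PySem.Str.split₀ ms.2).length : Int) else total) acc
    = sentences.foldl
      (fun c s => if g s then c + ((PySem.Str.split₀ s).length : Int) else c) acc := by
  induction sentences generalizing acc with
  | nil => rfl
  | cons s t ih => simp only [List.map_cons, List.zip_cons_cons, List.foldl_cons, ih]


-- ===== VERDICT (by name: the statement is the Claim_ definition above) =====
theorem get_boiler_plate_word_count_spec : Claim_equal_get_boiler_plate_word_count := by
  intro bp row _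
  unfold Spec_get_boiler_plate_word_count get_boiler_plate_word_count get_boiler_plate_word_count_alt
  simp only [pvMask_eq, pvSum_eq]
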